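-- pv_equiv track=rewrite | github.com/HoChangSUNG/programmers_python | level_2/repeat_binary_convert.py | solution
-- ===== SOURCE A (Python) =====
-- def solution(s):#이진 변환 반복하기
--     count = 0 # 이진 변환의 횟수
--     sum_delete_zero = 0 # 이진 변환 과정에서 제거된 모든 0의 개수
--     while s != '1':
--         delete_zero_count=s.count('0') # 제거할 0의 개수
--         sum_delete_zero+=delete_zero_count
--         after_zero_length = len(s)-delete_zero_count # 0제거 후 길이
--         s = bin(after_zero_length)[2:] # 이진 변환 결과(0b는 제외하고 s에 저장)
--         count += 1
--     return [count,sum_delete_zero]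
-- ===== SOURCE B (Python) =====
-- def solution(s):
--     # Dynamic programming: sieve bit-count/bit-length tables and step/zero tables
--     # bottom-up, then answer by a single table lookup (no per-step binary strings).
--     if s == '1':
--         return [0, 0]
--     zeros0 = s.count('0')
--     n1 = len(s) - zeros0
--     N = n1 + 1
--     bc = [0] * N  # bc[m] = number of 1 bits of m
--     bl = [0] * N  # bl[m] = bit length of m
--     for m in range(1, N):
--         bc[m] = bc[m >> 1] + (m & 1)
--         bl[m] = bl[m >> 1] + 1
--     steps = [0] * N  # steps[m] = iterations from bin(m) down to '1'
--     zrs = [0] * N    # zrs[m]   = zeros removed along the way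
--     for m in range(2, N):
--         steps[m] = steps[bc[m]] + 1
--         zrs[m] = zrs[bc[m]] + bl[m] - bc[m]
--     return [1 + steps[n1], zeros0 + zrs[n1]]
-- ===== Notes on version B (the rewrite author's own statement) =====
-- stated objective: alternative
-- what changed: Replaces A's iterative rebuild-the-binary-string loop by bottom-up dynamic programming: sieve tables bc/bl (bit counts and bit lengths for all m up to the count of non-'0' chars) and DP tables steps/zrs filled in one pass, the answer being a single table lookup; no binary strings are ever built.
-- outside the precondition, e.g. on solution('0'): A does not finish within the time limit, B returns [1, 1]
import Mathlib
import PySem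

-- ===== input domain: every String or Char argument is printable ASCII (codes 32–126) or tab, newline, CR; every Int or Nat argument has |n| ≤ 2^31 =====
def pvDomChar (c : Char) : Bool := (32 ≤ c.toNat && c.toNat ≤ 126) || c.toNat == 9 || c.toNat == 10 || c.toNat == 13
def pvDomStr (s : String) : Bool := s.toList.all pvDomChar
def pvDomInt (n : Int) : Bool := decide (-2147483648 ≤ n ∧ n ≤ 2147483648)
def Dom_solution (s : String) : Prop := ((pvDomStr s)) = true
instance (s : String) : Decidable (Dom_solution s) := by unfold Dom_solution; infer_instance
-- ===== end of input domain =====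

-- B replaces A's rebuild-binary-string loop by bottom-up DP tables (bit-count/bit-length sieve, then step/zero tables) and a single lookup; same values on Pre_ (alternative, not measured faster).


-- ===== PORT A =====
-- A's while loop, step for step, on the string's characters; the fuel only makes the
-- loop total (A diverges on all-'0' strings, which Pre_ excludes; on Pre_ inputs the
-- fuel s.length + 2 is never exhausted, see the proofs below).
def loopA : Nat → List Char → Int → Int → List Int
  | 0, _, count, sum => [count, sum]
  | fuel + 1, s, count, sum =>
    if s = ['1'] then [count, sum]
    else
      let deleteZeroCount : Nat := PySem.Chars.count s ['0']      -- s.count('0')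
      let afterZeroLength : Nat := s.length - deleteZeroCount     -- len(s) - …  (the count is ≤ len, so Nat subtraction is exact)
      loopA fuel (PySem.Int.toBinChars (afterZeroLength : Int))   -- bin(…)[2:]
        (count + 1) (sum + (deleteZeroCount : Int))

def solution (s : String) : List Int := loopA (s.toList.length + 2) s.toList 0 0

-- ===== PORT B =====
-- B's DP: sieve tables bc/bl over range(1,N), DP tables steps/zrs over range(2,N),
-- then one lookup. List.set/getD mirror Python list assignment/indexing (all indices in range).
def solution_alt (s : String) : List Int :=
  if s.toList = ['1'] then [0, 0]
  else
    let zeros0 : Nat := PySem.Chars.count s.toList ['0']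
    let n1 : Nat := s.toList.length - zeros0                      -- count('0') ≤ len, so Nat subtraction is exact
    let N : Nat := n1 + 1
    let t1 := (PySem.List.pyRange 1 (N : Int) 1).foldl
      (fun (p : List Nat × List Nat) (mi : Int) =>
        let m := mi.toNat
        (p.1.set m (p.1.getD (m / 2) 0 + m % 2),                  -- bc[m] = bc[m>>1] + (m&1)
         p.2.set m (p.2.getD (m / 2) 0 + 1)))                     -- bl[m] = bl[m>>1] + 1
      (List.replicate N 0, List.replicate N 0)
    let bc := t1.1
    let bl := t1.2
    let t2 := (PySem.List.pyRange 2 (N : Int) 1).foldl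
      (fun (p : List Int × List Int) (mi : Int) =>
        let m := mi.toNat
        (p.1.set m (p.1.getD (bc.getD m 0) 0 + 1),                -- steps[m] = steps[bc[m]] + 1
         p.2.set m (p.2.getD (bc.getD m 0) 0 + (bl.getD m 0 : Int) - (bc.getD m 0 : Int))))  -- zrs[m] = zrs[bc[m]] + bl[m] - bc[m]
      (List.replicate N 0, List.replicate N 0)
    [1 + t2.1.getD n1 0, (zeros0 : Int) + t2.2.getD n1 0]

-- ===== PRECONDITION & SPEC =====
-- Pre_ excludes exactly the strings all of whose characters are '0' (including the
-- empty string): on those inputs Python A's while loop never terminates, so A returns nothing.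
def Pre_solution (s : String) : Prop := s.toList.count '0' < s.toList.length
instance (s : String) : Decidable (Pre_solution s) := by unfold Pre_solution; infer_instance
def pvWitness_solution : String := "110010101001001000111010011110"

def Spec_solution (s : String) (out : List Int) : Prop := out = solution_alt s
instance (s : String) (out : List Int) : Decidable (Spec_solution s out) := by unfold Spec_solution; infer_instance

-- ===== CLAIM (what is proved, stated in full; the proofs are below) =====
def Claim_equal_solution : Prop := ∀ (s : String), Dom_solution s → Pre_solution s → Spec_solution s (solution s)

-- ===== LEMMAS AND PROOFS =====

-- s.count(sub) for a single-character sub is the plain character count.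
lemma charsCount_go_singleton (c : Char) : ∀ (s : List Char) (fuel acc : Nat),
    s.length ≤ fuel → PySem.Chars.count.go [c] fuel s acc = acc + s.count c := by
  intro s
  induction s with
  | nil =>
    intro fuel acc h
    cases fuel <;> simp [PySem.Chars.count.go]
  | cons h t ih =>
    intro fuel acc hle
    cases fuel with
    | zero => simp at hle
    | succ f =>
      have hlen : t.length ≤ f := by simpa using hle
      by_cases hc : c = h
      · subst hc
        have : ([c].isPrefixOf (c :: t)) = true := by simp [List.isPrefixOf]
        simp only [PySem.Chars.count.go, this, if_true, List.length_cons,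
          List.length_nil, Nat.zero_add, List.drop_succ_cons, List.drop_zero]
        rw [ih f (acc + 1) hlen]
        simp
        omega
      · have : ([c].isPrefixOf (h :: t)) = false := by
          simp [List.isPrefixOf, hc]
        simp only [PySem.Chars.count.go, this, if_false, Bool.false_eq_true]
        rw [ih f acc hlen]
        simp [Ne.symm hc]

lemma charsCount_singleton (s : List Char) (c : Char) :
    PySem.Chars.count s [c] = s.count c := by
  simp [PySem.Chars.count, charsCount_go_singleton c s s.length 0 (Nat.le_refl _)]

lemma getD_set_eq' {Q : Type} (l : List Q) (i : Nat) (a d : Q) (h : i < l.length) :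
    (l.set i a).getD i d = a := by
  simp [List.getD_eq_getElem?_getD, List.getElem?_set_eq_of_lt _ h]

lemma getD_set_ne' {Q : Type} (l : List Q) (i j : Nat) (a d : Q) (h : i ≠ j) :
    (l.set i a).getD j d = l.getD j d := by
  simp [List.getD_eq_getElem?_getD, List.getElem?_set_ne h]

-- bcF m / blF m: number of 1-bits / bit length of m (the values B's sieve tabulates).
def bcF : Nat → Nat
  | 0 => 0
  | n + 1 => bcF ((n + 1) / 2) + (n + 1) % 2
decreasing_by exact Nat.div_lt_self (Nat.succ_pos n) (by norm_num)

def blF : Nat → Nat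
  | 0 => 0
  | n + 1 => blF ((n + 1) / 2) + 1
decreasing_by exact Nat.div_lt_self (Nat.succ_pos n) (by norm_num)

lemma bcF_pos_def (n : Nat) (hn : 1 ≤ n) : bcF n = bcF (n / 2) + n % 2 := by
  obtain ⟨m, rfl⟩ := Nat.exists_eq_add_of_le hn
  rw [Nat.add_comm]; rw [bcF]

lemma blF_pos_def (n : Nat) (hn : 1 ≤ n) : blF n = blF (n / 2) + 1 := by
  obtain ⟨m, rfl⟩ := Nat.exists_eq_add_of_le hn
  rw [Nat.add_comm]; rw [blF]

lemma bcF_le (n : Nat) : bcF n ≤ n := by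
  induction n using Nat.strong_induction_on with
  | _ n ih =>
    rcases Nat.eq_zero_or_pos n with rfl | hn
    · simp [bcF]
    · rw [bcF_pos_def n hn]
      have := ih (n / 2) (Nat.div_lt_self hn (by norm_num))
      omega

lemma bcF_lt (n : Nat) (hn : 2 ≤ n) : bcF n < n := by
  rw [bcF_pos_def n (by omega)]
  have := bcF_le (n / 2)
  omega

lemma bcF_pos (n : Nat) (hn : 1 ≤ n) : 1 ≤ bcF n := by
  induction n using Nat.strong_induction_on with
  | _ n ih =>
    rw [bcF_pos_def n hn]
    rcases Nat.lt_or_ge n 2 with h | h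
    · interval_cases n <;> simp [bcF]
    · have := ih (n / 2) (Nat.div_lt_self hn (by norm_num)) (by omega)
      omega

lemma bcF_le_blF (n : Nat) : bcF n ≤ blF n := by
  induction n using Nat.strong_induction_on with
  | _ n ih =>
    rcases Nat.eq_zero_or_pos n with rfl | hn
    · simp [bcF, blF]
    · rw [bcF_pos_def n hn, blF_pos_def n hn]
      have := ih (n / 2) (Nat.div_lt_self hn (by norm_num))
      omega

-- binList n = the binary digits of n (empty for n = 0); equals bin(n)[2:] for n ≥ 1.
def binList : Nat → List Char
  | 0 => []
  | n + 1 => binList ((n + 1) / 2) ++ [Nat.digitChar ((n + 1) % 2)]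
decreasing_by exact Nat.div_lt_self (Nat.succ_pos n) (by norm_num)

lemma binList_zero : binList 0 = [] := by rw [binList]

lemma binList_pos (n : Nat) (hn : 1 ≤ n) :
    binList n = binList (n / 2) ++ [Nat.digitChar (n % 2)] := by
  obtain ⟨m, rfl⟩ := Nat.exists_eq_add_of_le hn
  rw [Nat.add_comm]
  rw [binList]

lemma toDigitsCore_two_eq : ∀ (fuel n : Nat) (acc : List Char), n < fuel →
    Nat.toDigitsCore 2 fuel n acc = (if n = 0 then ['0'] else binList n) ++ acc := by
  intro fuel
  induction fuel with
  | zero => intro n acc h; omega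
  | succ f ih =>
    intro n acc h
    simp only [Nat.toDigitsCore]
    by_cases h2 : n / 2 = 0
    · have : n = 0 ∨ n = 1 := by omega
      rcases this with rfl | rfl <;>
        simp [h2, binList, Nat.digitChar]
    · have hn1 : 1 ≤ n := by omega
      rw [if_neg h2, ih (n / 2) _ (by omega), if_neg h2, binList_pos n hn1]
      rw [if_neg (show n ≠ 0 by omega), List.append_assoc, List.singleton_append]

lemma toBinChars_eq_binList (n : Nat) (hn : 1 ≤ n) :
    PySem.Int.toBinChars (n : Int) = binList n := by
  have : ¬ ((n : Int) < 0) := by omega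
  simp only [PySem.Int.toBinChars, this, if_false, Int.toNat_natCast, Nat.toDigits]
  rw [toDigitsCore_two_eq (n + 1) n [] (Nat.lt_succ_self n), if_neg (by omega), List.append_nil]

lemma binList_length (n : Nat) : (binList n).length = blF n := by
  induction n using Nat.strong_induction_on with
  | _ n ih =>
    rcases Nat.eq_zero_or_pos n with rfl | hn
    · simp [binList_zero, blF]
    · rw [binList_pos n hn, blF_pos_def n hn]
      simp [ih (n / 2) (Nat.div_lt_self hn (by norm_num))]

lemma binList_count_zero_add (n : Nat) :
    (binList n).count '0' + bcF n = blF n := by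
  induction n using Nat.strong_induction_on with
  | _ n ih =>
    rcases Nat.eq_zero_or_pos n with rfl | hn
    · simp [binList_zero, bcF, blF]
    · rw [binList_pos n hn, bcF_pos_def n hn, blF_pos_def n hn]
      have h2 : n % 2 = 0 ∨ n % 2 = 1 := by omega
      have := ih (n / 2) (Nat.div_lt_self hn (by norm_num))
      rw [List.count_append]
      rcases h2 with h2 | h2 <;> rw [h2] <;>
        simp only [show Nat.digitChar 0 = '0' from rfl, show Nat.digitChar 1 = '1' from rfl,
          show List.count '0' ['0'] = 1 from by decide, show List.count '0' ['1'] = 0 from by decide] <;>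
        omega

lemma binList_ne_nil (n : Nat) (hn : 1 ≤ n) : binList n ≠ [] := by
  rw [binList_pos n hn]
  simp

lemma binList_eq_one_iff (n : Nat) (hn : 1 ≤ n) : binList n = ['1'] ↔ n = 1 := by
  constructor
  · intro h
    by_contra hne
    have hhalf : 1 ≤ n / 2 := by omega
    rw [binList_pos n hn] at h
    have h1 := binList_ne_nil (n / 2) hhalf
    have := congrArg List.length h
    simp at this
    exact h1 this
  · rintro rfl
    rw [binList_pos 1 (by norm_num)]
    rw [show (1 : Nat) / 2 = 0 from rfl, binList_zero]
    rfl

-- stepsF n / zerF n: iterations from bin(n) to '1' and zeros removed along the way.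
def stepsF : Nat → Nat
  | 0 => 0
  | 1 => 0
  | n + 2 => stepsF (bcF (n + 2)) + 1
decreasing_by exact bcF_lt (n + 2) (by omega)

def zerF : Nat → Nat
  | 0 => 0
  | 1 => 0
  | n + 2 => zerF (bcF (n + 2)) + (blF (n + 2) - bcF (n + 2))
decreasing_by exact bcF_lt (n + 2) (by omega)

lemma stepsF_two_def (n : Nat) (hn : 2 ≤ n) : stepsF n = stepsF (bcF n) + 1 := by
  obtain ⟨m, rfl⟩ := Nat.exists_eq_add_of_le hn
  rw [Nat.add_comm]; rw [stepsF]

lemma zerF_two_def (n : Nat) (hn : 2 ≤ n) : zerF n = zerF (bcF n) + (blF n - bcF n) := by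
  obtain ⟨m, rfl⟩ := Nat.exists_eq_add_of_le hn
  rw [Nat.add_comm]; rw [zerF]

-- A's closed form: from a binary string bin(n), the loop returns [c + stepsF n, z + zerF n].
lemma loopA_closed : ∀ (n : Nat), 1 ≤ n → ∀ (fuel : Nat), n ≤ fuel → ∀ (c z : Int),
    loopA fuel (binList n) c z = [c + (stepsF n : Int), z + (zerF n : Int)] := by
  intro n
  induction n using Nat.strong_induction_on with
  | _ n ih =>
    intro hn fuel hf c z
    obtain ⟨f, rfl⟩ : ∃ f, fuel = f + 1 := ⟨fuel - 1, by omega⟩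
    rcases Nat.eq_or_lt_of_le hn with h1 | h2
    · rw [← h1, show binList 1 = ['1'] from (binList_eq_one_iff 1 (by norm_num)).mpr rfl]
      rw [loopA, if_pos rfl]
      simp [stepsF, zerF]
    · have h2' : 2 ≤ n := h2
      have hbc_lt := bcF_lt n h2'
      have hbc_pos := bcF_pos n hn
      have hne : binList n ≠ ['1'] :=
        fun h => absurd ((binList_eq_one_iff n hn).mp h) (by omega)
      rw [loopA, if_neg hne]
      simp only [charsCount_singleton]
      have hcnt := binList_count_zero_add n
      have hlen := binList_length n
      have hcount : (binList n).count '0' = blF n - bcF n := by omega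
      have hafter : (binList n).length - (blF n - bcF n) = bcF n := by omega
      rw [hcount, hafter, toBinChars_eq_binList _ hbc_pos,
        ih (bcF n) hbc_lt hbc_pos f (by omega)]
      rw [stepsF_two_def n h2', zerF_two_def n h2']
      have hle := bcF_le_blF n
      simp only [List.cons.injEq, and_true]
      refine ⟨by push_cast; ring, by push_cast [Nat.cast_sub hle]; ring⟩

-- ---- table correctness for B's folds ----

-- the bc/bl sieve: after folding range(1,K), entry j holds bcF j / blF j for j < K.
lemma t1_fold_correct (L : Nat) : ∀ (K : Nat), K ≤ L →
    let r := (PySem.List.pyRange 1 (K : Int) 1).foldl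
      (fun (p : List Nat × List Nat) (mi : Int) =>
        let m := mi.toNat
        (p.1.set m (p.1.getD (m / 2) 0 + m % 2),
         p.2.set m (p.2.getD (m / 2) 0 + 1)))
      (List.replicate L 0, List.replicate L 0)
    r.1.length = L ∧ r.2.length = L ∧
      ∀ j, j < L → r.1.getD j 0 = (if j < K then bcF j else 0) ∧
                   r.2.getD j 0 = (if j < K then blF j else 0) := by
  intro K
  induction K with
  | zero =>
    intro _
    rw [PySem.List.pyRange_one_eq_nil (by norm_num)]
    refine ⟨by simp, by simp, fun j hj => ?_⟩
    simp [List.getD_eq_getElem?_getD, hj]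
  | succ K ih =>
    intro hK
    have hK' : K ≤ L := by omega
    rcases Nat.eq_zero_or_pos K with rfl | hKpos
    · have hnil : PySem.List.pyRange 1 ((0 + 1 : Nat) : Int) 1 = [] :=
        PySem.List.pyRange_one_eq_nil (by norm_num)
      rw [hnil]
      simp only [List.foldl_nil]
      refine ⟨by simp, by simp, fun j hj => ?_⟩
      by_cases hj0 : j = 0
      · subst hj0
        simp [List.getD_eq_getElem?_getD, hj,
          show bcF 0 = 0 from by rw [bcF], show blF 0 = 0 from by rw [blF]]
      · rw [if_neg (by omega : ¬ j < 0 + 1), if_neg (by omega : ¬ j < 0 + 1)]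
        simp [List.getD_eq_getElem?_getD, hj]
    · have hsplit : PySem.List.pyRange 1 ((K + 1 : Nat) : Int) 1
          = PySem.List.pyRange 1 (K : Int) 1 ++ [(K : Int)] := by
        have := PySem.List.pyRange_one_succ_right (a := 1) (b := (K : Int)) (by exact_mod_cast hKpos)
        simpa [Nat.cast_add, Nat.cast_one] using this
      obtain ⟨hl1, hl2, hval⟩ := ih hK'
      rw [hsplit, List.foldl_append]
      simp only [List.foldl_cons, List.foldl_nil]
      set r := (PySem.List.pyRange 1 (K : Int) 1).foldl
        (fun (p : List Nat × List Nat) (mi : Int) =>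
          let m := mi.toNat
          (p.1.set m (p.1.getD (m / 2) 0 + m % 2),
           p.2.set m (p.2.getD (m / 2) 0 + 1)))
        (List.replicate L 0, List.replicate L 0) with hr
      have hKL : K < L := by omega
      have hhalf : K / 2 < K := Nat.div_lt_self hKpos (by norm_num)
      have hbcK : r.1.getD (K / 2) 0 = bcF (K / 2) := by
        have := (hval (K / 2) (by omega)).1
        rwa [if_pos hhalf] at this
      have hblK : r.2.getD (K / 2) 0 = blF (K / 2) := by
        have := (hval (K / 2) (by omega)).2
        rwa [if_pos hhalf] at this
      refine ⟨by simp [hl1], by simp [hl2], fun j hj => ?_⟩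
      simp only [Int.toNat_natCast]
      by_cases hjK : j = K
      · subst hjK
        rw [getD_set_eq' _ _ _ _ (by omega), getD_set_eq' _ _ _ _ (by omega)]
        rw [hbcK, hblK, if_pos (by omega : j < j + 1), if_pos (by omega : j < j + 1)]
        exact ⟨(bcF_pos_def j hKpos).symm, (blF_pos_def j hKpos).symm⟩
      · rw [getD_set_ne' _ _ _ _ _ (fun h => hjK h.symm),
          getD_set_ne' _ _ _ _ _ (fun h => hjK h.symm)]
        rcases hval j hj with ⟨hv1, hv2⟩
        rw [hv1, hv2]
        have : (j < K + 1) ↔ (j < K) := by omega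
        simp [this]

-- the steps/zrs DP: after folding range(2,K), entry j holds stepsF j / zerF j for j < K.
lemma t2_fold_correct (L : Nat) (bc bl : List Nat)
    (hbc : ∀ j, j < L → bc.getD j 0 = bcF j) (hbl : ∀ j, j < L → bl.getD j 0 = blF j) :
    ∀ (K : Nat), K ≤ L →
    let r := (PySem.List.pyRange 2 (K : Int) 1).foldl
      (fun (p : List Int × List Int) (mi : Int) =>
        let m := mi.toNat
        (p.1.set m (p.1.getD (bc.getD m 0) 0 + 1),
         p.2.set m (p.2.getD (bc.getD m 0) 0 + (bl.getD m 0 : Int) - (bc.getD m 0 : Int))))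
      (List.replicate L 0, List.replicate L 0)
    r.1.length = L ∧ r.2.length = L ∧
      ∀ j, j < L → r.1.getD j 0 = (if j < K then (stepsF j : Int) else 0) ∧
                   r.2.getD j 0 = (if j < K then (zerF j : Int) else 0) := by
  intro K
  induction K with
  | zero =>
    intro _
    rw [PySem.List.pyRange_one_eq_nil (by norm_num)]
    refine ⟨by simp, by simp, fun j hj => ?_⟩
    simp [List.getD_eq_getElem?_getD, hj]
  | succ K ih =>
    intro hK
    have hK' : K ≤ L := by omega
    rcases Nat.lt_or_ge K 2 with hKsm | hKge
    · -- K + 1 ≤ 2: the range is still empty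
      have hnil : PySem.List.pyRange 2 ((K + 1 : Nat) : Int) 1 = [] :=
        PySem.List.pyRange_one_eq_nil (by push_cast; omega)
      rw [hnil]
      simp only [List.foldl_nil]
      refine ⟨by simp, by simp, fun j hj => ?_⟩
      by_cases hjs : j < K + 1
      · have : j = 0 ∨ j = 1 := by omega
        rcases this with rfl | rfl <;>
          simp [List.getD_eq_getElem?_getD, hj, hjs,
            show stepsF 0 = 0 from by rw [stepsF], show stepsF 1 = 0 from by rw [stepsF],
            show zerF 0 = 0 from by rw [zerF], show zerF 1 = 0 from by rw [zerF]]
      · rw [if_neg hjs, if_neg hjs]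
        simp [List.getD_eq_getElem?_getD, hj]
    · have hsplit : PySem.List.pyRange 2 ((K + 1 : Nat) : Int) 1
          = PySem.List.pyRange 2 (K : Int) 1 ++ [(K : Int)] := by
        have := PySem.List.pyRange_one_succ_right (a := 2) (b := (K : Int)) (by exact_mod_cast hKge)
        simpa [Nat.cast_add, Nat.cast_one] using this
      obtain ⟨hl1, hl2, hval⟩ := ih hK'
      rw [hsplit, List.foldl_append]
      simp only [List.foldl_cons, List.foldl_nil]
      set r := (PySem.List.pyRange 2 (K : Int) 1).foldl
        (fun (p : List Int × List Int) (mi : Int) =>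
          let m := mi.toNat
          (p.1.set m (p.1.getD (bc.getD m 0) 0 + 1),
           p.2.set m (p.2.getD (bc.getD m 0) 0 + (bl.getD m 0 : Int) - (bc.getD m 0 : Int))))
        (List.replicate L 0, List.replicate L 0) with hr
      have hKL : K < L := by omega
      have hbcK : bc.getD K 0 = bcF K := hbc K hKL
      have hblK : bl.getD K 0 = blF K := hbl K hKL
      have hbc_lt := bcF_lt K hKge
      have hsteps_bc : r.1.getD (bcF K) 0 = (stepsF (bcF K) : Int) := by
        have := (hval (bcF K) (by omega)).1
        rwa [if_pos (by omega)] at this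
      have hzer_bc : r.2.getD (bcF K) 0 = (zerF (bcF K) : Int) := by
        have := (hval (bcF K) (by omega)).2
        rwa [if_pos (by omega)] at this
      refine ⟨by simp [hl1], by simp [hl2], fun j hj => ?_⟩
      simp only [Int.toNat_natCast]
      by_cases hjK : j = K
      · subst hjK
        rw [getD_set_eq' _ _ _ _ (by omega), getD_set_eq' _ _ _ _ (by omega)]
        rw [hbcK, hblK, hsteps_bc, hzer_bc,
          if_pos (by omega : j < j + 1), if_pos (by omega : j < j + 1)]
        have hle := bcF_le_blF j
        rw [stepsF_two_def j hKge, zerF_two_def j hKge]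
        constructor
        · push_cast; ring
        · push_cast [Nat.cast_sub hle]; ring
      · rw [getD_set_ne' _ _ _ _ _ (fun h => hjK h.symm),
          getD_set_ne' _ _ _ _ _ (fun h => hjK h.symm)]
        rcases hval j hj with ⟨hv1, hv2⟩
        rw [hv1, hv2]
        have : (j < K + 1) ↔ (j < K) := by omega
        simp [this]

-- ===== VERDICT (by name: the statement is the Claim_ definition above) =====
theorem solution_spec : Claim_equal_solution := by
  intro s _ hpre
  unfold Spec_solution solution solution_alt Pre_solution at *
  by_cases h1 : s.toList = ['1']
  · rw [if_pos h1, h1, loopA, if_pos rfl]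
  · rw [if_neg h1]
    have hcle : s.toList.count '0' ≤ s.toList.length := List.count_le_length
    rw [loopA, if_neg h1]
    simp only [charsCount_singleton]
    set n1 := s.toList.length - s.toList.count '0' with hn1
    have hpos : 1 ≤ n1 := by omega
    rw [toBinChars_eq_binList _ hpos,
      loopA_closed n1 hpos (s.toList.length + 1) (by omega)]
    -- B's side: table lookups
    obtain ⟨hbl1, hbl2, hv1⟩ := t1_fold_correct (n1 + 1) (n1 + 1) (le_refl _)
    obtain ⟨_, _, hv2⟩ := t2_fold_correct (n1 + 1) _ _
      (fun j hj => by have := (hv1 j hj).1; rwa [if_pos hj] at this)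
      (fun j hj => by have := (hv1 j hj).2; rwa [if_pos hj] at this)
      (n1 + 1) (le_refl _)
    rcases hv2 n1 (by omega) with ⟨hs, hz⟩
    rw [if_pos (by omega)] at hs hz
    rw [hs, hz]
    simp only [List.cons.injEq, and_true]
    exact ⟨by ring, by ring⟩
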